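-- pv_equiv track=rewrite | github.com/XuelinHu/Matrix-ResGNN-GraphClassificatio | src/models/common.py | build_neighbor_map
-- ===== SOURCE A (Python) =====
-- from typing import Dict, List, Sequence, Tuple
--
-- GridIndex = Tuple[int, int]
--
-- def valid_branch(branch: int, num_branches: int) -> bool:
--     return 0 <= branch < num_branches
--
-- def vertical_neighbors(branch: int, layer: int, num_branches: int) -> List[GridIndex]:
--     del num_branches
--     if layer <= 0:
--         return []
--     return [(branch, layer - 1)]
--
-- def horizontal_neighbors(branch: int, layer: int, num_branches: int) -> List[GridIndex]:
--     neighbors: List[GridIndex] = []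
--     for other in (branch - 1, branch + 1):
--         if valid_branch(other, num_branches):
--             neighbors.append((other, layer))
--     return neighbors
--
-- def matrix_neighbors(branch: int, layer: int, num_branches: int) -> List[GridIndex]:
--     neighbors = vertical_neighbors(branch, layer, num_branches)
--     neighbors.extend(horizontal_neighbors(branch, layer, num_branches))
--     if layer > 0:
--         for other in (branch - 1, branch + 1):
--             if valid_branch(other, num_branches):
--                 neighbors.append((other, layer - 1))
--     return neighbors
--
-- def build_neighbor_map(num_branches: int, num_layers: int, mode: str) -> Dict[GridIndex, List[GridIndex]]:
--     if mode == "plain":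
--         fn = lambda b, l, nb: []  # noqa: E731
--     elif mode == "vertical":
--         fn = vertical_neighbors
--     elif mode == "horizontal":
--         fn = horizontal_neighbors
--     elif mode == "matrix":
--         fn = matrix_neighbors
--     else:
--         raise ValueError(f"Unsupported mode: {mode}")
--
--     mapping: Dict[GridIndex, List[GridIndex]] = {}
--     for branch in range(num_branches):
--         for layer in range(num_layers):
--             mapping[(branch, layer)] = fn(branch, layer, num_branches)
--     return mapping
-- ===== SOURCE B (Python) =====
-- OFFSETS = {
--     "plain": [],
--     "vertical": [(0, -1)],
--     "horizontal": [(-1, 0), (1, 0)],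
--     "matrix": [(0, -1), (-1, 0), (1, 0), (-1, -1), (1, -1)],
-- }
--
-- def build_neighbor_map(num_branches, num_layers, mode):
--     if mode not in OFFSETS:
--         raise ValueError(f"Unsupported mode: {mode}")
--     offsets = OFFSETS[mode]
--     return {
--         (b, l): [(b + db, l + dl) for db, dl in offsets
--                  if 0 <= b + db < num_branches and 0 <= l + dl]
--         for b in range(num_branches) for l in range(num_layers)
--     }
-- ===== Notes on version B (the rewrite author's own statement) =====
-- stated objective: idiomatic
-- what changed: Replaces the four per-mode neighbor helper functions with a single offset table (mode -> list of (dbranch, dlayer) deltas) and one uniform bounds check inside a dict comprehension.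
import Mathlib
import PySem

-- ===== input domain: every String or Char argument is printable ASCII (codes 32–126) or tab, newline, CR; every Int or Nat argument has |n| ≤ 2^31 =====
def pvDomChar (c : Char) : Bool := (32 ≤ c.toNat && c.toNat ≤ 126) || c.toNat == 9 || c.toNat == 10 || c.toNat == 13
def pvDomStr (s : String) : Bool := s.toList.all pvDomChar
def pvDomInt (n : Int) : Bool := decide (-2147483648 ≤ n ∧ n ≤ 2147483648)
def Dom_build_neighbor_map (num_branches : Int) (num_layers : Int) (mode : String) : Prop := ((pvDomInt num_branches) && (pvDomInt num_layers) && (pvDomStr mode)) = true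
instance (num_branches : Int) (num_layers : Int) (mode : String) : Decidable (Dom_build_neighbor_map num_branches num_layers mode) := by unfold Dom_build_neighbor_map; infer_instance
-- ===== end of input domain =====

-- B replaces the four per-mode neighbor helpers by one offset table per mode with a
-- single uniform validity check (idiomatic / data-structure change); same return values.

-- ===== PORT A =====
def valid_branch (branch : Int) (num_branches : Int) : Bool :=
  decide (0 ≤ branch ∧ branch < num_branches)

def vertical_neighbors (branch : Int) (layer : Int) (_num_branches : Int) : List (Int × Int) :=
  if layer ≤ 0 then [] else [(branch, layer - 1)]

def horizontal_neighbors (branch : Int) (layer : Int) (num_branches : Int) : List (Int × Int) :=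
  [branch - 1, branch + 1].foldl
    (fun acc other => if valid_branch other num_branches then acc ++ [(other, layer)] else acc) []

def matrix_neighbors (branch : Int) (layer : Int) (num_branches : Int) : List (Int × Int) :=
  let neighbors := vertical_neighbors branch layer num_branches
  let neighbors := neighbors ++ horizontal_neighbors branch layer num_branches
  if layer > 0 then
    [branch - 1, branch + 1].foldl
      (fun acc other => if valid_branch other num_branches then acc ++ [(other, layer - 1)] else acc)
      neighbors
  else neighbors

-- the fn selected by A's if/elif chain (the final else raises ValueError: outside Pre_)
def pvFnA (mode : String) (b l nb : Int) : List (Int × Int) :=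
  if mode = "plain" then []
  else if mode = "vertical" then vertical_neighbors b l nb
  else if mode = "horizontal" then horizontal_neighbors b l nb
  else if mode = "matrix" then matrix_neighbors b l nb
  else []

def build_neighbor_map (num_branches : Int) (num_layers : Int) (mode : String) : List (Int × Int × List (Int × Int)) :=
  if mode = "plain" ∨ mode = "vertical" ∨ mode = "horizontal" ∨ mode = "matrix" then
    ((PySem.List.pyRange 0 num_branches 1).foldl
        (fun d branch =>
          (PySem.List.pyRange 0 num_layers 1).foldl
            (fun d layer => d.insert (branch, layer) (pvFnA mode branch layer num_branches)) d)
        (PySem.Dict.empty : PySem.Dict (Int × Int) (List (Int × Int)))).items.map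
      (fun p => (p.1.1, p.1.2, p.2))
  else []  -- ValueError in Python; excluded by Pre_

-- ===== PORT B =====
def pvOFFSETS : PySem.Dict String (List (Int × Int)) :=
  PySem.Dict.ofList
    [("plain", []), ("vertical", [(0, -1)]), ("horizontal", [(-1, 0), (1, 0)]),
     ("matrix", [(0, -1), (-1, 0), (1, 0), (-1, -1), (1, -1)])]

def build_neighbor_map_alt (num_branches : Int) (num_layers : Int) (mode : String) : List (Int × Int × List (Int × Int)) :=
  match pvOFFSETS.get? mode with
  | none => []  -- ValueError in Python; excluded by Pre_
  | some offsets =>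
    (PySem.List.pyRange 0 num_branches 1).flatMap (fun b =>
      (PySem.List.pyRange 0 num_layers 1).map (fun l =>
        (b, l,
          (offsets.filter (fun o => decide (0 ≤ b + o.1 ∧ b + o.1 < num_branches ∧ 0 ≤ l + o.2))).map
            (fun o => (b + o.1, l + o.2)))))

-- ===== PRECONDITION & SPEC =====
-- Pre_ excludes exactly the unsupported modes, on which A raises ValueError (B raises it too).
def Pre_build_neighbor_map (num_branches : Int) (num_layers : Int) (mode : String) : Prop :=
  mode = "plain" ∨ mode = "vertical" ∨ mode = "horizontal" ∨ mode = "matrix"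
instance (num_branches : Int) (num_layers : Int) (mode : String) : Decidable (Pre_build_neighbor_map num_branches num_layers mode) := by unfold Pre_build_neighbor_map; infer_instance

def pvWitness_build_neighbor_map : Int × Int × String := (3, 2, "matrix")

def Spec_build_neighbor_map (num_branches : Int) (num_layers : Int) (mode : String) (out : List (Int × Int × List (Int × Int))) : Prop := out = build_neighbor_map_alt num_branches num_layers mode
instance (num_branches : Int) (num_layers : Int) (mode : String) (out : List (Int × Int × List (Int × Int))) : Decidable (Spec_build_neighbor_map num_branches num_layers mode out) := by unfold Spec_build_neighbor_map; infer_instance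

-- ===== CLAIM (what is proved, stated in full; the proofs are below) =====
def Claim_equal_build_neighbor_map : Prop := ∀ (num_branches : Int) (num_layers : Int) (mode : String), Dom_build_neighbor_map num_branches num_layers mode → Pre_build_neighbor_map num_branches num_layers mode → Spec_build_neighbor_map num_branches num_layers mode (build_neighbor_map num_branches num_layers mode)

-- ===== LEMMAS AND PROOFS =====

-- B's per-cell list for a given offset table
def pvCellB (offs : List (Int × Int)) (nb b l : Int) : List (Int × Int) :=
  (offs.filter (fun o => decide (0 ≤ b + o.1 ∧ b + o.1 < nb ∧ 0 ≤ l + o.2))).map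
    (fun o => (b + o.1, l + o.2))

theorem pvCellB_append (o1 o2 : List (Int × Int)) (nb b l : Int) :
    pvCellB (o1 ++ o2) nb b l = pvCellB o1 nb b l ++ pvCellB o2 nb b l := by
  simp [pvCellB, List.filter_append]

theorem pv_vert_cell (nb b l : Int) (hb : 0 ≤ b) (hb' : b < nb) (hl : 0 ≤ l) :
    vertical_neighbors b l nb = pvCellB [(0,-1)] nb b l := by
  by_cases h : 0 < l
  · simp [vertical_neighbors, pvCellB, show ¬ l ≤ 0 by omega, hb, hb',
      show (0:Int) ≤ l + -1 by omega, Prod.ext_iff]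
    omega
  · simp [vertical_neighbors, pvCellB, show l ≤ 0 by omega,
      show ¬ (0:Int) ≤ l + -1 by omega]

theorem pv_horiz_cell (nb b l : Int) (hb : 0 ≤ b) (hb' : b < nb) (hl : 0 ≤ l) :
    horizontal_neighbors b l nb = pvCellB [(-1,0),(1,0)] nb b l := by
  by_cases h0 : (1:Int) ≤ b <;> by_cases h1 : b + 1 < nb <;>
    simp_all [horizontal_neighbors, pvCellB, valid_branch,
      show ((0:Int) ≤ b + -1) ↔ ((1:Int) ≤ b) from by omega,
      show (b + -1 < nb) = True from by simp; omega,
      show (b - 1 < nb) = True from by simp; omega,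
      show ((0:Int) ≤ b - 1) ↔ ((1:Int) ≤ b) from by omega,
      show ((0:Int) ≤ b + 1) = True from by simp; omega,
      Prod.ext_iff] <;>
    first
      | omega
      | (split_ifs <;> simp_all [Prod.ext_iff] <;> omega)

theorem pv_shift_cell (nb b l : Int) (hl : 0 < l) :
    pvCellB [(-1,-1),(1,-1)] nb b l = pvCellB [(-1,0),(1,0)] nb b (l-1) := by
  have e1 : ((0:Int) ≤ l + -1) = True := by simp; omega
  have e2 : ((0:Int) ≤ l - 1 + 0) = True := by simp; omega
  by_cases h1 : (0:Int) ≤ b + -1 <;> by_cases h2 : b + -1 < nb <;>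
    by_cases h3 : (0:Int) ≤ b + 1 <;> by_cases h4 : b + 1 < nb <;>
    · simp only [pvCellB, List.filter_cons, List.filter_nil, e1, e2, h1, h2, h3, h4,
        decide_eq_true_eq, decide_eq_false_iff_not, List.map_cons, List.map_nil]
      simp_all [Prod.ext_iff]
      try omega

theorem pv_shift_cell_nil (nb b l : Int) (hl : l ≤ 0) :
    pvCellB [(-1,-1),(1,-1)] nb b l = [] := by
  simp [pvCellB, show ¬ (0:Int) ≤ l + -1 by omega]

theorem pv_matrix_cell (nb b l : Int) (hb : 0 ≤ b) (hb' : b < nb) (hl : 0 ≤ l) :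
    matrix_neighbors b l nb
      = pvCellB [(0,-1),(-1,0),(1,0),(-1,-1),(1,-1)] nb b l := by
  have hsplit : ([(0,-1),(-1,0),(1,0),(-1,-1),(1,-1)] : List (Int × Int))
      = [(0,-1)] ++ [(-1,0),(1,0)] ++ [(-1,-1),(1,-1)] := by rfl
  rw [hsplit, pvCellB_append, pvCellB_append, ← pv_vert_cell nb b l hb hb' hl,
    ← pv_horiz_cell nb b l hb hb' hl]
  unfold matrix_neighbors
  by_cases h : 0 < l
  · have hh : horizontal_neighbors b (l-1) nb
        = ([b - 1, b + 1].filter (fun o => valid_branch o nb)).map (fun o => (o, l - 1)) := by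
      unfold horizontal_neighbors
      rw [PySem.List.foldl_append_if]
      simp
    rw [if_pos h, PySem.List.foldl_append_if, pv_shift_cell nb b l h,
      ← pv_horiz_cell nb b (l-1) hb hb' (by omega), hh, List.append_assoc]
  · rw [if_neg h, pv_shift_cell_nil nb b l (by omega)]
    simp

-- the nested insert loop over fresh distinct keys appends all its (key, value) pairs in order
theorem pv_outer_items (bs : List Int) (nl : Int) (f : Int → Int → List (Int × Int))
    (d : PySem.Dict (Int × Int) (List (Int × Int)))
    (hd : ∀ p ∈ d.items, p.1.1 ∉ bs) (hnd : bs.Nodup) :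
    (bs.foldl (fun d branch =>
        (PySem.List.pyRange 0 nl 1).foldl
          (fun d layer => d.insert (branch, layer) (f branch layer)) d) d).items
      = d.items ++ bs.flatMap (fun b =>
          (PySem.List.pyRange 0 nl 1).map (fun l => ((b, l), f b l))) := by
  induction bs generalizing d with
  | nil => simp
  | cons b bs ih =>
    simp only [List.foldl_cons, List.flatMap_cons]
    have hfresh : ∀ a ∈ PySem.List.pyRange 0 nl 1, d.contains (b, a) = false := by
      intro a _
      rcases h : d.contains (b, a) with _ | _
      · rfl
      · exfalso
        have hk : (b, a) ∈ d.keys := (PySem.Dict.contains_iff_mem_keys _ _).1 h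
        simp only [PySem.Dict.keys, List.mem_map] at hk
        obtain ⟨p, hp, hpe⟩ := hk
        have : p.1.1 = b := by rw [hpe]
        exact hd p hp (this ▸ List.mem_cons_self)
    have hknd : ((PySem.List.pyRange 0 nl 1).map (fun a => ((b, a) : Int × Int))).Nodup :=
      (PySem.List.nodup_pyRange_one 0 nl).map (fun x y h => by simpa using congrArg Prod.snd h)
    have hinner := PySem.Dict.items_foldl_insert_fresh (l := PySem.List.pyRange 0 nl 1)
      (k := fun a => ((b, a) : Int × Int)) (v := fun a => f b a) (d := d) hfresh hknd
    rw [ih _ ?_ hnd.of_cons, hinner, List.append_assoc]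
    intro p hp
    rw [hinner] at hp
    rcases List.mem_append.1 hp with h1 | h2
    · exact fun hm => hd p h1 (List.mem_cons_of_mem _ hm)
    · obtain ⟨a, _, rfl⟩ := List.mem_map.1 h2
      simpa using (List.nodup_cons.1 hnd).1

-- every supported mode's helper equals B's uniform offset filter on the visited cells
theorem pv_cell (mode : String) (offs : List (Int × Int))
    (hoff : pvOFFSETS.get? mode = some offs)
    (hmode : mode = "plain" ∨ mode = "vertical" ∨ mode = "horizontal" ∨ mode = "matrix")
    (nb b l : Int) (hb : 0 ≤ b) (hb' : b < nb) (hl : 0 ≤ l) :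
    pvFnA mode b l nb = pvCellB offs nb b l := by
  rcases hmode with rfl | rfl | rfl | rfl
  · have : offs = [] := by
      rw [show pvOFFSETS.get? "plain" = some [] from rfl] at hoff
      exact (Option.some_inj.1 hoff).symm
    subst this; simp [pvFnA, pvCellB]
  · have : offs = [(0,-1)] := by
      rw [show pvOFFSETS.get? "vertical" = some [(0,-1)] from rfl] at hoff
      exact (Option.some_inj.1 hoff).symm
    subst this
    simpa [pvFnA] using pv_vert_cell nb b l hb hb' hl
  · have : offs = [(-1,0),(1,0)] := by
      rw [show pvOFFSETS.get? "horizontal" = some [(-1,0),(1,0)] from rfl] at hoff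
      exact (Option.some_inj.1 hoff).symm
    subst this
    simpa [pvFnA] using pv_horiz_cell nb b l hb hb' hl
  · have : offs = [(0,-1),(-1,0),(1,0),(-1,-1),(1,-1)] := by
      rw [show pvOFFSETS.get? "matrix"
          = some [(0,-1),(-1,0),(1,0),(-1,-1),(1,-1)] from rfl] at hoff
      exact (Option.some_inj.1 hoff).symm
    subst this
    simpa [pvFnA] using pv_matrix_cell nb b l hb hb' hl

-- ===== VERDICT (by name: the statement is the Claim_ definition above) =====
theorem build_neighbor_map_spec : Claim_equal_build_neighbor_map := by
  intro nb nl mode _ hpre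
  unfold Pre_build_neighbor_map at hpre
  unfold Spec_build_neighbor_map build_neighbor_map
  rw [if_pos hpre]
  obtain ⟨offs, hoff⟩ : ∃ offs, pvOFFSETS.get? mode = some offs := by
    rcases hpre with rfl | rfl | rfl | rfl <;> exact ⟨_, rfl⟩
  unfold build_neighbor_map_alt
  rw [hoff]
  rw [pv_outer_items (PySem.List.pyRange 0 nb 1) nl _ PySem.Dict.empty
    (by simp [PySem.Dict.empty, PySem.Dict.items])
    (PySem.List.nodup_pyRange_one 0 nb)]
  simp only [show (PySem.Dict.empty : PySem.Dict (Int × Int) (List (Int × Int))).items = []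
      from rfl, List.nil_append, List.map_flatMap, List.map_map]
  rw [List.flatMap_def, List.flatMap_def]
  refine congrArg List.flatten (List.map_congr_left ?_)
  intro b hbmem
  have hb := (PySem.List.mem_pyRange_one.1 hbmem)
  refine List.map_congr_left ?_
  intro l hlmem
  have hl := (PySem.List.mem_pyRange_one.1 hlmem)
  simp only [Function.comp]
  rw [pv_cell mode offs hoff hpre nb b l hb.1 hb.2 hl.1]
  rfl
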